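-- pv_equiv track=rewrite | github.com/pabloschwarzenberg/grader | tema4_ej3/tema4_ej3_c85b5ee02d902e67fd33f3d07858c75c.py | traducir_a_jerigonzo
-- ===== SOURCE A (Python) =====
-- def traducir_a_jerigonzo(texto):
--     resultado = ""
--     vocales = "aeiouáéíóúAEIOUÁÉÍÓÚ"
--
--     for letra in texto:
--         if letra in vocales:
--             resultado += letra + 'p' + letra.lower()
--         else:
--             resultado += letra
--
--     return resultado
-- ===== SOURCE B (Python) =====
-- def _expandir(c):
--     # per-character jerigonzo expansion
--     if c in "aeiouáéíóúAEIOUÁÉÍÓÚ":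
--         return c + 'p' + c.lower()
--     return c
--
-- def traducir_a_jerigonzo(texto):
--     # divide and conquer: the expansion is character-wise, so the translation
--     # of a string is the translation of its halves, concatenated
--     n = len(texto)
--     if n == 0:
--         return ""
--     if n == 1:
--         return _expandir(texto)
--     m = n // 2
--     return traducir_a_jerigonzo(texto[:m]) + traducir_a_jerigonzo(texto[m:])
-- ===== Notes on version B (the rewrite author's own statement) =====
-- stated objective: alternative
-- what changed: Replaces A's linear accumulator loop by a divide-and-conquer recursion: split the string in halves, translate each half recursively, concatenate; correct because the expansion is character-wise, so translation is a string homomorphism.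
import Mathlib
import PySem

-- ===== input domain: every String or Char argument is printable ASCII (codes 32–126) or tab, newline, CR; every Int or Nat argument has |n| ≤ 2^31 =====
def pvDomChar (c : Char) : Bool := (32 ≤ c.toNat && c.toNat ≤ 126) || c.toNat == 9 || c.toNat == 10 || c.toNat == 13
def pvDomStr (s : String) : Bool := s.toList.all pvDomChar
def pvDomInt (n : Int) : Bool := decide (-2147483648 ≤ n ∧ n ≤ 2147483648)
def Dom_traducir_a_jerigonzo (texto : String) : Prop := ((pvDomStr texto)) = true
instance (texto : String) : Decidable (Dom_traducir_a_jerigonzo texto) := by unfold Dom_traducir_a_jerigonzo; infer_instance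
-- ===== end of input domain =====

-- B replaces A's linear accumulator loop by divide-and-conquer recursion on string
-- halves (correct since the expansion is character-wise); objective: alternative.

-- ===== PORT A =====
def traducir_a_jerigonzo (texto : String) : String :=
  let vocales : List Char := "aeiouáéíóúAEIOUÁÉÍÓÚ".toList
  String.mk (texto.toList.foldl
    (fun resultado letra =>
      if letra ∈ vocales then
        resultado ++ [letra, 'p', PySem.Chars.lowerChar letra]
      else
        resultado ++ [letra]) [])

-- ===== PORT B =====
-- per-character expansion (_expandir), on one character
def pvExpandir (c : Char) : List Char :=
  if c ∈ "aeiouáéíóúAEIOUÁÉÍÓÚ".toList then [c, 'p', PySem.Chars.lowerChar c] else [c]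

-- divide and conquer on the character list: halves translated recursively, concatenated
def jerigonzoDC : List Char → List Char
  | [] => []
  | [c] => pvExpandir c
  | c1 :: c2 :: rest =>
      let l := c1 :: c2 :: rest
      jerigonzoDC (l.take (l.length / 2)) ++ jerigonzoDC (l.drop (l.length / 2))
termination_by l => l.length
decreasing_by
  · simp [List.length_take]; omega
  · simp [List.length_drop]; omega

def traducir_a_jerigonzo_alt (texto : String) : String :=
  String.mk (jerigonzoDC texto.toList)

-- ===== PRECONDITION & SPEC =====
def Spec_traducir_a_jerigonzo (texto : String) (out : String) : Prop := out = traducir_a_jerigonzo_alt texto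
instance (texto : String) (out : String) : Decidable (Spec_traducir_a_jerigonzo texto out) := by unfold Spec_traducir_a_jerigonzo; infer_instance

-- ===== CLAIM (what is proved, stated in full; the proofs are below) =====
def Claim_equal_traducir_a_jerigonzo : Prop := ∀ (texto : String), Dom_traducir_a_jerigonzo texto → Spec_traducir_a_jerigonzo texto (traducir_a_jerigonzo texto)

-- ===== LEMMAS AND PROOFS =====

-- the divide-and-conquer recursion computes the character-wise expansion
theorem jerigonzoDC_eq_flatMap (l : List Char) : jerigonzoDC l = l.flatMap pvExpandir := by
  induction h : l.length using Nat.strong_induction_on generalizing l with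
  | _ n ih =>
    match l with
    | [] => simp [jerigonzoDC]
    | [c] => simp [jerigonzoDC]
    | c1 :: c2 :: rest =>
      rw [jerigonzoDC]
      have hlen : (c1 :: c2 :: rest).length = n := h
      simp only [List.length_cons] at hlen
      rw [ih ((c1 :: c2 :: rest).take ((c1 :: c2 :: rest).length / 2)).length
            (by simp [List.length_take]; omega) _ rfl,
          ih ((c1 :: c2 :: rest).drop ((c1 :: c2 :: rest).length / 2)).length
            (by simp [List.length_drop]; omega) _ rfl,
          ← List.flatMap_append, List.take_append_drop]

-- ===== VERDICT (by name: the statement is the Claim_ definition above) =====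
theorem traducir_a_jerigonzo_spec : Claim_equal_traducir_a_jerigonzo := by
  intro texto _
  unfold Spec_traducir_a_jerigonzo traducir_a_jerigonzo traducir_a_jerigonzo_alt
  show String.mk (texto.toList.foldl
      (fun resultado letra =>
        if letra ∈ "aeiouáéíóúAEIOUÁÉÍÓÚ".toList then
          resultado ++ [letra, 'p', PySem.Chars.lowerChar letra]
        else resultado ++ [letra]) []) = _
  have hf : (fun (resultado : List Char) letra =>
      if letra ∈ "aeiouáéíóúAEIOUÁÉÍÓÚ".toList then
        resultado ++ [letra, 'p', PySem.Chars.lowerChar letra]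
      else resultado ++ [letra]) = fun acc x => acc ++ pvExpandir x := by
    funext acc x
    unfold pvExpandir
    split <;> rfl
  rw [jerigonzoDC_eq_flatMap, hf,
      PySem.List.foldl_append_eq_flatMap (g := pvExpandir), List.nil_append]
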